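-- pv_equiv track=rewrite | github.com/gms92/carSpec | carScrap/extractor/CarSpecExtractor.py | replaceRepeatedKeys
-- ===== SOURCE A (Python) =====
-- def replaceRepeatedKeys(keys):
--
--     keysFilter = []
--
--     for key in keys:
--         if key[0] == 'Dianteiros' and key[1] == 'Traseiros':
--             key = ['Freios dianteiros','Freios traseiros']
--
--         if key[0] == 'Dianteira' and key[1] == 'Elemento elástico':
--             key = ['Suspensão dianteira','Elemento elástico dianteiro']
--
--         if key[0] == 'Traseira' and key[1] == 'Elemento elástico':
--             key = ['Suspensão traseira','Elemento elástico traseiro']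
--
--         if key[0] == 'Dianteiros' and key[1] == 'Altura do flanco':
--             key = ['Pneus dianteiros','Altura do flanco dianteiro']
--
--         if key[0] == 'Traseiros' and key[1] == 'Altura do flanco':
--             key = ['Pneus traseiros','Altura do flanco traseiro']
--
--         keysFilter.append(key)
--
--
--     return keysFilter
-- ===== SOURCE B (Python) =====
-- _RULES = [
--     (('Dianteiros', 'Traseiros'), ['Freios dianteiros', 'Freios traseiros']),
--     (('Dianteira', 'Elemento el\u00e1stico'), ['Suspens\u00e3o dianteira', 'Elemento el\u00e1stico dianteiro']),
--     (('Traseira', 'Elemento el\u00e1stico'), ['Suspens\u00e3o traseira', 'Elemento el\u00e1stico traseiro']),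
--     (('Dianteiros', 'Altura do flanco'), ['Pneus dianteiros', 'Altura do flanco dianteiro']),
--     (('Traseiros', 'Altura do flanco'), ['Pneus traseiros', 'Altura do flanco traseiro']),
-- ]
--
--
-- def replaceRepeatedKeys(keys):
--     # Staged rewriting: apply each rule in its own full pass over the list.
--     # Correct because no replacement value is itself a trigger pair, so the
--     # passes commute with A's per-element branch chain.
--     out = list(keys)
--     for (a, b), rep in _RULES:
--         out = [rep if k[0] == a and k[1] == b else k for k in out]
--     return out
-- ===== Notes on version B (the rewrite author's own statement) =====
-- stated objective: alternative
-- what changed: A makes a single pass applying a five-branch if chain to each element; B instead rewrites the whole list in five staged passes, one full pass per rule driven by a rule table, correct because no replacement value triggers a later rule.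
import Mathlib
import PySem

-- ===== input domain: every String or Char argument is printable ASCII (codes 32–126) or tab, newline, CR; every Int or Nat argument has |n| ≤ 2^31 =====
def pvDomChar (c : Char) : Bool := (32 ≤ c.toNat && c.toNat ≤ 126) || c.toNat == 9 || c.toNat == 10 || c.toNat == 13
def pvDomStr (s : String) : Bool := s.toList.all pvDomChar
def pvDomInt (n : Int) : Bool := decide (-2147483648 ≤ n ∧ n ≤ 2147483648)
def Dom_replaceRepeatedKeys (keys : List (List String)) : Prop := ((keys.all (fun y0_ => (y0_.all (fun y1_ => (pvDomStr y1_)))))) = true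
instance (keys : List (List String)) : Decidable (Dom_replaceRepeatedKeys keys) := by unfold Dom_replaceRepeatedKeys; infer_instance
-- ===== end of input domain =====

-- B replaces A's single pass with a five-branch chain per element by five staged
-- whole-list passes, one per rule from a rule table (same cost; objective: alternative).

-- ===== PORT A =====
-- One iteration of A's loop body: the five sequential `if` rebindings of `key`.
-- `key[i] == 's'` is ported as `pyGet? key i == some s` (outside Pre_ Python raises there).
def replaceOneA (key : List String) : List String :=
  let key := if PySem.List.pyGet? key 0 == some "Dianteiros" && PySem.List.pyGet? key 1 == some "Traseiros" then
    ["Freios dianteiros", "Freios traseiros"] else key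
  let key := if PySem.List.pyGet? key 0 == some "Dianteira" && PySem.List.pyGet? key 1 == some "Elemento elástico" then
    ["Suspensão dianteira", "Elemento elástico dianteiro"] else key
  let key := if PySem.List.pyGet? key 0 == some "Traseira" && PySem.List.pyGet? key 1 == some "Elemento elástico" then
    ["Suspensão traseira", "Elemento elástico traseiro"] else key
  let key := if PySem.List.pyGet? key 0 == some "Dianteiros" && PySem.List.pyGet? key 1 == some "Altura do flanco" then
    ["Pneus dianteiros", "Altura do flanco dianteiro"] else key
  let key := if PySem.List.pyGet? key 0 == some "Traseiros" && PySem.List.pyGet? key 1 == some "Altura do flanco" then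
    ["Pneus traseiros", "Altura do flanco traseiro"] else key
  key

def replaceRepeatedKeys (keys : List (List String)) : List (List String) :=
  keys.foldl (fun keysFilter key => keysFilter ++ [replaceOneA key]) []

-- ===== PORT B =====
-- B's module-level rule table `_RULES`.
def rulesB : List ((String × String) × List String) :=
  [(("Dianteiros", "Traseiros"), ["Freios dianteiros", "Freios traseiros"]),
   (("Dianteira", "Elemento elástico"), ["Suspensão dianteira", "Elemento elástico dianteiro"]),
   (("Traseira", "Elemento elástico"), ["Suspensão traseira", "Elemento elástico traseiro"]),
   (("Dianteiros", "Altura do flanco"), ["Pneus dianteiros", "Altura do flanco dianteiro"]),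
   (("Traseiros", "Altura do flanco"), ["Pneus traseiros", "Altura do flanco traseiro"])]

-- One staged pass: the comprehension `[rep if k[0]==a and k[1]==b else k for k in out]`.
def passB (r : (String × String) × List String) (out : List (List String)) : List (List String) :=
  out.map (fun k =>
    if PySem.List.pyGet? k 0 == some r.1.1 && PySem.List.pyGet? k 1 == some r.1.2 then r.2 else k)

def replaceRepeatedKeys_alt (keys : List (List String)) : List (List String) :=
  rulesB.foldl (fun out r => passB r out) keys

-- ===== PRECONDITION & SPEC =====
-- A raises IndexError on a key of length 0, or of length 1 whose head is one of the four
-- trigger first-words (then key[1] is evaluated); Pre_ excludes exactly those inputs.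
def Pre_replaceRepeatedKeys (keys : List (List String)) : Prop :=
  ∀ k ∈ keys, k ≠ [] ∧ (k.length = 1 →
    k.getD 0 "" ∉ (["Dianteiros", "Dianteira", "Traseira", "Traseiros"] : List String))
instance (keys : List (List String)) : Decidable (Pre_replaceRepeatedKeys keys) := by
  unfold Pre_replaceRepeatedKeys; infer_instance

def pvWitness_replaceRepeatedKeys : List (List String) :=
  [["Dianteiros", "Traseiros"], ["Motor"], ["Dianteiros", "Altura do flanco", "x"]]

def Spec_replaceRepeatedKeys (keys : List (List String)) (out : List (List String)) : Prop := out = replaceRepeatedKeys_alt keys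
instance (keys : List (List String)) (out : List (List String)) : Decidable (Spec_replaceRepeatedKeys keys out) := by unfold Spec_replaceRepeatedKeys; infer_instance

-- ===== CLAIM (what is proved, stated in full; the proofs are below) =====
def Claim_equal_replaceRepeatedKeys : Prop := ∀ (keys : List (List String)), Dom_replaceRepeatedKeys keys → Pre_replaceRepeatedKeys keys → Spec_replaceRepeatedKeys keys (replaceRepeatedKeys keys)

-- ===== LEMMAS AND PROOFS =====

-- A's append-accumulator loop is the pointwise map of its body.
theorem foldA_eq_map (f : List String → List String) (keys : List (List String)) :
    ∀ acc, keys.foldl (fun a k => a ++ [f k]) acc = acc ++ keys.map f := by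
  induction keys with
  | nil => intro acc; simp
  | cons k ks ih => intro acc; simp [List.foldl, ih, List.append_assoc]

theorem alt_eq_map (keys : List (List String)) :
    replaceRepeatedKeys_alt keys = keys.map replaceOneA := by
  unfold replaceRepeatedKeys_alt rulesB
  simp only [List.foldl]
  simp only [passB, List.map_map]
  apply List.map_congr_left
  intro k _
  rfl

-- ===== VERDICT (by name: the statement is the Claim_ definition above) =====
theorem replaceRepeatedKeys_spec : Claim_equal_replaceRepeatedKeys := by
  intro keys _ _
  unfold Spec_replaceRepeatedKeys replaceRepeatedKeys
  rw [foldA_eq_map, alt_eq_map]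
  simp
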